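-- pv_equiv track=rewrite | github.com/marontakuto/Program | NED/NED2.py | filter_turn_status_data
-- ===== SOURCE A (Python) =====
-- from typing import List, Dict, Optional, Tuple
--
-- def filter_turn_status_data(data: List[Dict[str, str]]) -> List[Dict[str, str]]:
--     """旋回状態のデータをフィルタリング"""
--     # turn_statusが空でないデータがある場合のみフィルタリング
--     has_turn_status = any(row.get('turn_status') for row in data)
--     if not has_turn_status:
--         return data
--
--     turn_status_data = []
--     found_0_to_3 = False
--
--     for row in data:
--         if not row.get('turn_status'):
--             if found_0_to_3:  # すでに開始していれば追加
--                 turn_status_data.append(row)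
--             continue
--
--         try:
--             status = int(row['turn_status'])
--             if status == 0 and not found_0_to_3:
--                 found_0_to_3 = True
--
--             if found_0_to_3:
--                 turn_status_data.append(row)
--                 if status == 1:
--                     # 直近5件にstatus=3があるかチェック
--                     recent_statuses = [
--                         int(prev_row['turn_status'])
--                         for prev_row in turn_status_data[-5:]
--                         if prev_row.get('turn_status') and prev_row['turn_status'].isdigit()
--                     ]
--                     if 3 in recent_statuses:
--                         break
--         except ValueError:
--             if found_0_to_3:
--                 turn_status_data.append(row)
--             continue
--
--     return turn_status_data if turn_status_data else data
-- ===== SOURCE B (Python) =====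
-- from typing import List, Dict
--
--
-- def _to_int(s):
--     try:
--         return int(s)
--     except ValueError:
--         return None
--
--
-- def filter_turn_status_data(data: List[Dict[str, str]]) -> List[Dict[str, str]]:
--     """旋回状態のデータをフィルタリング (index arithmetic: find start and stop indices, return one slice of data)"""
--     statuses = [row.get('turn_status') or '' for row in data]
--     start = next((i for i, ts in enumerate(statuses) if ts and _to_int(ts) == 0), None)
--     if start is None:
--         return data
--     for j in range(start, len(data)):
--         ts = statuses[j]
--         if ts and _to_int(ts) == 1:
--             window = [int(t) for t in statuses[max(start, j - 4):j + 1] if t and t.isdigit()]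
--             if 3 in window:
--                 return data[start:j + 1]
--     return data[start:]
-- ===== Notes on version B (the rewrite author's own statement) =====
-- stated objective: simpler
-- what changed: Replaces A's stateful accumulation loop (found-flag, incrementally built collected list, re-slicing collected[-5:] at each status==1 row) by pure index arithmetic over a precomputed status list: find the start index, scan for the stop index checking the window statuses[max(start,j-4):j+1] of the original data, and return a single slice data[start:j+1] or data[start:] - no collected list or flag is ever maintained.
import Mathlib
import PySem

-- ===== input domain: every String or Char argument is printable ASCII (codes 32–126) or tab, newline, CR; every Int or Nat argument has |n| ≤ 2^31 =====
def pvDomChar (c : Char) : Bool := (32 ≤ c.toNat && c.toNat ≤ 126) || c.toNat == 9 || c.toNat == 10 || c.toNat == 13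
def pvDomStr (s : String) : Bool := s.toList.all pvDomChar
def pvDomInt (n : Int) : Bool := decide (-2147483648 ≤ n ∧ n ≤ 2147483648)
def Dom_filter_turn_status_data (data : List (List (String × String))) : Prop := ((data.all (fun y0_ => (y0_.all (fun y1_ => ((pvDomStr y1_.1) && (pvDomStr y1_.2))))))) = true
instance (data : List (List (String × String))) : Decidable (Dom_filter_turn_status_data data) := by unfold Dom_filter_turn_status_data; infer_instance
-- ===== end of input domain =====

-- B replaces A's stateful accumulation loop (found-flag + incrementally built collected list,
-- re-sliced at each break check) by index arithmetic over a precomputed status list: find the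
-- start index, scan for the stop index, return one slice of data; same value (A is total).

-- ===== PORT A =====

-- row.get('turn_status') or missing/'' (a missing key and '' are equally falsy in A)
def tsOf (row : List (String × String)) : String :=
  (List.lookup "turn_status" row).getD ""

-- the list comprehension building recent_statuses from turn_status_data[-5:]
-- (int(...) is guarded by isdigit, so PySem.Int.ofStr? is some there; filterMap keeps guarded rows)
def aRecent (acc : List (List (String × String))) : List Int :=
  (PySem.List.slice acc (some (-5)) none).filterMap (fun prev =>
    if tsOf prev ≠ "" ∧ PySem.Str.strIsdigit (tsOf prev) then PySem.Int.ofStr? (tsOf prev) else none)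

-- the for-loop of A: state = (found_0_to_3, turn_status_data); returning acc mid-list = break
def filterA_loop : List (List (String × String)) → Bool → List (List (String × String)) →
    List (List (String × String))
  | [], _, acc => acc
  | row :: rest, found, acc =>
    if tsOf row = "" then
      filterA_loop rest found (if found then acc ++ [row] else acc)
    else
      match PySem.Int.ofStr? (tsOf row) with
      | none => filterA_loop rest found (if found then acc ++ [row] else acc)  -- except ValueError
      | some status =>
        let found' := found || decide (status = 0)
        if found' then
          if status = 1 ∧ (3 : Int) ∈ aRecent (acc ++ [row]) then acc ++ [row]  -- break
          else filterA_loop rest found' (acc ++ [row])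
        else filterA_loop rest found' acc

def filter_turn_status_data (data : List (List (String × String))) : List (List (String × String)) :=
  if data.all (fun row => tsOf row = "") then data  -- not has_turn_status
  else
    let turn_status_data := filterA_loop data false []
    if turn_status_data = [] then data else turn_status_data

-- ===== PORT B =====

-- the start predicate on a status string: ts truthy and _to_int(ts) == 0
def bStart (ts : String) : Bool := ts ≠ "" && PySem.Int.ofStr? ts == some 0

-- the window comprehension over statuses[max(start, j-4) : j+1]
-- (both slice bounds are ≥ 0 and ≤ j+1, so the Python slice is exactly drop-then-take)
def bWindow (statuses : List String) (start j : Nat) : List Int :=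
  ((statuses.drop (max start (j - 4))).take (j + 1 - max start (j - 4))).filterMap
    (fun t => if t ≠ "" ∧ PySem.Str.strIsdigit t then PySem.Int.ofStr? t else none)

-- 'for j in range(start, len(data))': scan statuses[start:] for the break index
-- (the window is computed only under the status==1 guard in Source B; here the guard is one ∧)
def bScan (statuses : List String) (start : Nat) : Nat → List String → Option Nat
  | _, [] => none
  | j, ts :: rest =>
    if ts ≠ "" ∧ PySem.Int.ofStr? ts = some 1 ∧ (3 : Int) ∈ bWindow statuses start j then some j
    else bScan statuses start (j + 1) rest

-- statuses = [row.get('turn_status') or '' for row in data]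
def bStatuses (data : List (List (String × String))) : List String := data.map tsOf

def filter_turn_status_data_alt (data : List (List (String × String))) :
    List (List (String × String)) :=
  match List.findIdx? bStart (bStatuses data) with
  | none => data
  | some start =>
    match bScan (bStatuses data) start start ((bStatuses data).drop start) with
    | some j => (data.drop start).take (j + 1 - start)  -- data[start:j+1] with 0 ≤ start ≤ j+1
    | none => data.drop start                           -- data[start:]

-- ===== PRECONDITION & SPEC =====
def Spec_filter_turn_status_data (data : List (List (String × String))) (out : List (List (String × String))) : Prop := out = filter_turn_status_data_alt data
instance (data : List (List (String × String))) (out : List (List (String × String))) : Decidable (Spec_filter_turn_status_data data out) := by unfold Spec_filter_turn_status_data; infer_instance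

-- ===== CLAIM (what is proved, stated in full; the proofs are below) =====
def Claim_equal_filter_turn_status_data : Prop := ∀ (data : List (List (String × String))), Dom_filter_turn_status_data data → Spec_filter_turn_status_data data (filter_turn_status_data data)

-- ===== LEMMAS AND PROOFS =====

-- A's recent_statuses over the collected slice data[start:j+1] is B's window over statuses
theorem aRecent_eq_bWindow (data : List (List (String × String))) (start j : Nat)
    (hsj : start ≤ j) (hj : j < data.length) :
    aRecent ((data.drop start).take (j + 1 - start)) = bWindow (data.map tsOf) start j := by
  have hle : j + 1 - start ≤ data.length - start := by omega
  have hlen : ((data.drop start).take (j + 1 - start)).length = j + 1 - start := by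
    rw [List.length_take, List.length_drop, min_eq_left hle]
  unfold aRecent bWindow
  rw [PySem.List.slice_from_neg_ofNat _ 5 (by omega), hlen]
  have h1 : ((data.drop start).take (j + 1 - start)).drop (j + 1 - start - 5)
      = (data.drop (max start (j - 4))).take (j + 1 - max start (j - 4)) := by
    have e1 : start + (j + 1 - start - 5) = max start (j - 4) := by omega
    have e2 : j + 1 - start - (j + 1 - start - 5) = j + 1 - max start (j - 4) := by omega
    rw [List.drop_take, List.drop_drop, e1, e2]
  have h2 : (data.map tsOf).drop (max start (j - 4)) = (data.drop (max start (j - 4))).map tsOf := by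
    rw [List.map_drop]
  rw [h1, h2, ← List.map_take, List.filterMap_map]
  rfl

-- appending data[j] to the collected slice data[start:j] gives data[start:j+1]
theorem take_snoc (data : List (List (String × String))) (start j : Nat) (row : List (String × String))
    (rest : List (List (String × String))) (hsj : start ≤ j) (hdrop : data.drop j = row :: rest) :
    (data.drop start).take (j - start) ++ [row] = (data.drop start).take (j + 1 - start) := by
  have h1 : j + 1 - start = (j - start) + 1 := by omega
  have h2 : (data.drop start).drop (j - start) = data.drop j := by
    rw [List.drop_drop]; congr 1; omega
  rw [h1, List.take_add, h2, hdrop]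
  rfl

-- core invariant: once found is set, A's loop over data[j:] with collected = data[start:j]
-- computes exactly the slice B's index scan designates
theorem loopA_eq_scan (data : List (List (String × String))) (start : Nat) :
    ∀ (suffix : List (List (String × String))) (j : Nat), start ≤ j → suffix = data.drop j →
    filterA_loop suffix true ((data.drop start).take (j - start)) =
      match bScan (data.map tsOf) start j (suffix.map tsOf) with
      | some k => (data.drop start).take (k + 1 - start)
      | none => data.drop start := by
  intro suffix
  induction suffix with
  | nil =>
    intro j hsj hsuffix
    show (data.drop start).take (j - start) = _
    rw [List.map_nil, bScan]
    have hlen : data.length ≤ j := by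
      have := congrArg List.length hsuffix
      simp only [List.length_nil, List.length_drop] at this
      omega
    exact List.take_of_length_le (by simp only [List.length_drop]; omega)
  | cons row rest ih =>
    intro j hsj hsuffix
    have hdrop : data.drop j = row :: rest := hsuffix.symm
    have hj : j < data.length := by
      have := congrArg List.length hdrop
      simp only [List.length_drop, List.length_cons] at this
      omega
    have hrest : rest = data.drop (j + 1) := by
      have h1 : (data.drop j).drop 1 = data.drop (j + 1) := List.drop_drop
      rw [hdrop] at h1
      simpa using h1
    have hsnoc := take_snoc data start j row rest hsj hdrop
    rw [List.map_cons, filterA_loop, bScan]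
    by_cases hts : tsOf row = ""
    · rw [if_pos hts, if_pos rfl, hsnoc, if_neg (by rintro ⟨h1, -⟩; exact h1 hts)]
      exact ih (j + 1) (by omega) hrest
    · rw [if_neg hts]
      cases hof : PySem.Int.ofStr? (tsOf row) with
      | none =>
        rw [if_pos rfl, hsnoc, if_neg (by rintro ⟨-, h1, -⟩; simp at h1)]
        exact ih (j + 1) (by omega) hrest
      | some status =>
        simp only [Bool.true_or, if_pos]
        rw [hsnoc, aRecent_eq_bWindow data start j hsj hj]
        by_cases hs : status = 1 ∧ (3 : Int) ∈ bWindow (data.map tsOf) start j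
        · rw [if_pos hs, if_pos ⟨hts, by simp only [hs.1], hs.2⟩]
        · rw [if_neg hs, if_neg (by
            rintro ⟨-, h1, h3⟩
            exact hs ⟨by injection h1, h3⟩)]
          exact ih (j + 1) (by omega) hrest

-- at a start row, entering A's loop with found=false is the same as with found=true
theorem startFlip (row : List (String × String)) (rest acc : List (List (String × String)))
    (h : bStart (tsOf row) = true) :
    filterA_loop (row :: rest) false acc = filterA_loop (row :: rest) true acc := by
  rw [bStart] at h
  rcases Bool.and_eq_true_iff.mp h with ⟨h1, h2⟩
  have hts : tsOf row ≠ "" := by simpa using h1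
  have hof : PySem.Int.ofStr? (tsOf row) = some 0 := beq_iff_eq.mp h2
  rw [filterA_loop, filterA_loop, if_neg hts, if_neg hts, hof]
  simp

-- a row that is not a start row is skipped by A while found is still false
theorem skipA (row : List (String × String)) (h : bStart (tsOf row) = false)
    (rest acc : List (List (String × String))) :
    filterA_loop (row :: rest) false acc = filterA_loop rest false acc := by
  rw [filterA_loop]
  by_cases hts : tsOf row = ""
  · simp [hts]
  · rw [if_neg hts]
    cases hof : PySem.Int.ofStr? (tsOf row) with
    | none => simp
    | some status =>
      have hs0 : status ≠ 0 := by
        intro h0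
        rw [bStart] at h
        simp [hts, hof, h0] at h
      simp [hs0]

-- the rows before the first start row are skipped by A (found stays false there)
theorem loopA_start : ∀ (l : List (List (String × String))) (i : Nat),
    List.findIdx? bStart (l.map tsOf) = some i →
    filterA_loop l false [] = filterA_loop (l.drop i) true [] := by
  intro l
  induction l with
  | nil => intro i h; simp at h
  | cons row rest ih =>
    intro i h
    rw [List.map_cons, List.findIdx?_cons] at h
    by_cases hb : bStart (tsOf row)
    · rw [if_pos hb] at h
      injection h with h
      subst h
      rw [List.drop_zero]
      exact startFlip row rest [] hb
    · rw [if_neg hb] at h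
      rcases Option.map_eq_some_iff.mp h with ⟨j, hj, hij⟩
      subst hij
      rw [skipA row (by simp [hb]) rest [], List.drop_succ_cons]
      exact ih j hj

-- no start row: A's loop collects nothing
theorem loopA_none : ∀ (l : List (List (String × String))),
    List.findIdx? bStart (l.map tsOf) = none → filterA_loop l false [] = [] := by
  intro l
  induction l with
  | nil => intro _; rfl
  | cons row rest ih =>
    intro h
    rw [List.map_cons, List.findIdx?_cons] at h
    by_cases hb : bStart (tsOf row)
    · simp [hb] at h
    · rw [skipA row (by simp [hb]) rest []]
      apply ih
      simpa [hb] using h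

-- bScan only returns indices ≥ its counter
theorem bScan_ge (statuses : List String) (start : Nat) :
    ∀ (l : List String) (j k : Nat), bScan statuses start j l = some k → j ≤ k := by
  intro l
  induction l with
  | nil => intro j k h; simp [bScan] at h
  | cons ts rest ih =>
    intro j k h
    rw [bScan] at h
    split at h
    · injection h with h; omega
    · have := ih (j + 1) k h; omega

-- ===== VERDICT (by name: the statement is the Claim_ definition above) =====
-- evaluation of B's port once the start search is decided
theorem alt_none (data : List (List (String × String)))
    (h : List.findIdx? bStart (bStatuses data) = none) :
    filter_turn_status_data_alt data = data := by
  rw [filter_turn_status_data_alt, h]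

theorem alt_some (data : List (List (String × String))) (start : Nat)
    (h : List.findIdx? bStart (bStatuses data) = some start) :
    filter_turn_status_data_alt data =
      match bScan (bStatuses data) start start ((bStatuses data).drop start) with
      | some j => (data.drop start).take (j + 1 - start)
      | none => data.drop start := by
  rw [filter_turn_status_data_alt, h]

-- ===== VERDICT (by name: the statement is the Claim_ definition above) =====
theorem filter_turn_status_data_spec : Claim_equal_filter_turn_status_data := by
  intro data _
  show filter_turn_status_data data = filter_turn_status_data_alt data
  by_cases hall : data.all (fun row => tsOf row = "")
  · have hnone : List.findIdx? bStart (bStatuses data) = none := by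
      rw [bStatuses, List.findIdx?_eq_none_iff]
      intro ts hts
      rcases List.mem_map.mp hts with ⟨row, hrow, rfl⟩
      rw [bStart]
      simp [List.all_eq_true.mp hall row hrow]
    rw [alt_none data hnone, filter_turn_status_data, if_pos hall]
  · rw [filter_turn_status_data, if_neg hall]
    show (if filterA_loop data false [] = [] then data else filterA_loop data false []) = _
    cases h : List.findIdx? bStart (bStatuses data) with
    | none =>
      rw [alt_none data h, loopA_none data (by rw [← bStatuses]; exact h), if_pos rfl]
    | some start =>
      have hstart : start < data.length := by
        have := (List.findIdx?_eq_some_iff_findIdx_eq.mp h).1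
        rw [bStatuses] at this
        simpa using this
      have hmap : List.findIdx? bStart (data.map tsOf) = some start := by rw [← bStatuses]; exact h
      have heq := loopA_eq_scan data start (data.drop start) start (le_refl start) rfl
      rw [Nat.sub_self, List.take_zero, List.map_drop] at heq
      rw [alt_some data start h]
      simp only [bStatuses]
      rw [loopA_start data start hmap, heq]
      cases hsc : bScan (List.map tsOf data) start start (List.drop start (List.map tsOf data)) with
      | none =>
        have hne : data.drop start ≠ [] := by
          simpa [List.drop_eq_nil_iff] using Nat.not_le.mpr hstart
        show (if data.drop start = [] then data else data.drop start) = data.drop start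
        rw [if_neg hne]
      | some k =>
        have hk : start ≤ k := bScan_ge (List.map tsOf data) start _ start k hsc
        have hne : (data.drop start).take (k + 1 - start) ≠ [] := by
          rw [← List.length_pos_iff, List.length_take, List.length_drop]
          omega
        show (if (data.drop start).take (k + 1 - start) = [] then data
              else (data.drop start).take (k + 1 - start)) = (data.drop start).take (k + 1 - start)
        rw [if_neg hne]
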